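-- pv_equiv track=rewrite | github.com/aryana-27/Airplane-Runway-Scheduling-System | daa.py | minimum_runways
-- ===== SOURCE A (Python) =====
-- def minimum_runways(arrivals, departures, types):
--     commercial_arrivals = []
--     commercial_departures = []
--     extra_runways = 0
--
--     for i in range(len(types)):
--         if types[i].lower() in ["private", "military"]:
--             extra_runways += 1  # Separate runway for each private or military flight
--         else:
--             commercial_arrivals.append(arrivals[i])
--             commercial_departures.append(departures[i])
--
--     commercial_arrivals.sort()
--     commercial_departures.sort()
--
--     max_runways_needed = 0
--     i, j, current_runways = 0, 0, 0
--
--     while i < len(commercial_arrivals) and j < len(commercial_departures):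
--         if commercial_arrivals[i] < commercial_departures[j]:
--             current_runways += 1
--             max_runways_needed = max(max_runways_needed, current_runways)
--             i += 1
--         else:
--             current_runways -= 1
--             j += 1
--
--     total_runways_needed = max_runways_needed + extra_runways
--     return total_runways_needed
-- ===== SOURCE B (Python) =====
-- def minimum_runways(arrivals, departures, types):
--     extra_runways = 0
--     events = []
--     for i, t in enumerate(types):
--         if t.lower() in ("private", "military"):
--             extra_runways += 1  # separate runway for each private or military flight
--         else:
--             events.append(3 * arrivals[i] + 1)    # arrival event
--             events.append(3 * departures[i] - 1)  # departure event; at equal times it sorts first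
--     events.sort()
--     current = peak = 0
--     for e in events:
--         current += 1 if e % 3 == 1 else -1
--         peak = max(peak, current)
--     return peak + extra_runways
-- ===== Notes on version B (the rewrite author's own statement) =====
-- stated objective: alternative
-- what changed: A sorts arrivals and departures into two lists and runs a two-pointer merge sweep; B encodes each commercial flight as two integer events (3*arrival+1, 3*departure-1), does a single sort of the combined event list and one linear sweep with a running count, the encoding placing a departure before an arrival at equal times exactly as A's strict '<' does.
import Mathlib
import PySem

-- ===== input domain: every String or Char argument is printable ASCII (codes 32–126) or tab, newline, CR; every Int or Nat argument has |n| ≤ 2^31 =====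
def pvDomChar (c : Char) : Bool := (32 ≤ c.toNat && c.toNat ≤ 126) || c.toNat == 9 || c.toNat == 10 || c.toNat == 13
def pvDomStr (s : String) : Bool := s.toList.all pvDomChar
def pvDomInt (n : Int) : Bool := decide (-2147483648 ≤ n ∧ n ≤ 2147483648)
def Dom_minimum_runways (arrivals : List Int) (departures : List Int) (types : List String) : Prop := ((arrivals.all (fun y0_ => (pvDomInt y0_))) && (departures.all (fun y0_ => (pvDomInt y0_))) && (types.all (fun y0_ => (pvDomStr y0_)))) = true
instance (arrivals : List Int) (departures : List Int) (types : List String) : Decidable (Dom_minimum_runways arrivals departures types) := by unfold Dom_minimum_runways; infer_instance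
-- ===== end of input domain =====

-- B replaces A's two sorted lists + two-pointer merge by one integer event list (3a+1 arrivals,
-- 3d-1 departures), a single sort and one sweep; same cost class, different decomposition ("alternative").

-- ===== PORT A =====

-- body of A's partition loop (branch order as in A)
def pvBodyA (s : List Int × List Int × Int) (a d : Int) (t : String) : List Int × List Int × Int :=
  if PySem.Str.lower t == "private" || PySem.Str.lower t == "military" then
    (s.1, s.2.1, s.2.2 + 1)
  else
    (s.1 ++ [a], s.2.1 ++ [d], s.2.2)

-- A's while loop over the two sorted lists (i/j cursors become the remaining suffixes)
def pvLoopA : List Int → List Int → Int → Int → Int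
  | a :: as, d :: ds, cur, mx =>
    if a < d then pvLoopA as (d :: ds) (cur + 1) (max mx (cur + 1))
    else pvLoopA (a :: as) ds (cur - 1) mx
  | [], _, _, mx => mx
  | _ :: _, [], _, mx => mx
termination_by as ds _ _ => as.length + ds.length

def minimum_runways (arrivals : List Int) (departures : List Int) (types : List String) : Int :=
  let st := (PySem.List.pyRange 0 (types.length : Int) 1).foldl
    (fun s i => pvBodyA s (PySem.List.pyGetD arrivals i 0) (PySem.List.pyGetD departures i 0)
                  (PySem.List.pyGetD types i "")) ([], [], 0)
  let ca := PySem.List.sorted st.1 (fun x => x) false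
  let cd := PySem.List.sorted st.2.1 (fun x => x) false
  pvLoopA ca cd 0 0 + st.2.2

-- ===== PORT B =====

-- body of B's partition loop: encode each commercial flight as two integer events
def pvBodyB (s : List Int × Int) (a d : Int) (t : String) : List Int × Int :=
  if PySem.Str.lower t == "private" || PySem.Str.lower t == "military" then
    (s.1, s.2 + 1)
  else
    (s.1 ++ [3 * a + 1, 3 * d - 1], s.2)

-- body of B's sweep loop
def pvStep (p : Int × Int) (e : Int) : Int × Int :=
  let c := p.1 + (if PySem.Int.mod e 3 == 1 then 1 else -1)
  (c, max p.2 c)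

def minimum_runways_alt (arrivals : List Int) (departures : List Int) (types : List String) : Int :=
  let st := (PySem.List.enumerate types).foldl
    (fun s it => pvBodyB s (PySem.List.pyGetD arrivals it.1 0) (PySem.List.pyGetD departures it.1 0) it.2)
    ([], 0)
  let evs := PySem.List.sorted st.1 (fun x => x) false
  let r := evs.foldl pvStep (0, 0)
  r.2 + st.2

-- ===== PRECONDITION & SPEC =====
-- Pre_ excludes exactly the inputs where Python A raises IndexError: an index i with a
-- commercial (not private/military) type but no arrivals[i] or departures[i].
def Pre_minimum_runways (arrivals : List Int) (departures : List Int) (types : List String) : Prop :=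
  ∀ i : Nat, i < types.length →
    (PySem.Str.lower (types.getD i "") ≠ "private" ∧ PySem.Str.lower (types.getD i "") ≠ "military") →
    i < arrivals.length ∧ i < departures.length
instance (arrivals : List Int) (departures : List Int) (types : List String) : Decidable (Pre_minimum_runways arrivals departures types) := by unfold Pre_minimum_runways; infer_instance

def pvWitness_minimum_runways : List Int × List Int × List String :=
  ([1, 2, 10], [5, 4, 11], ["commercial", "Private", "cargo"])

def Spec_minimum_runways (arrivals : List Int) (departures : List Int) (types : List String) (out : Int) : Prop := out = minimum_runways_alt arrivals departures types
instance (arrivals : List Int) (departures : List Int) (types : List String) (out : Int) : Decidable (Spec_minimum_runways arrivals departures types out) := by unfold Spec_minimum_runways; infer_instance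

-- ===== CLAIM (what is proved, stated in full; the proofs are below) =====
def Claim_equal_minimum_runways : Prop := ∀ (arrivals : List Int) (departures : List Int) (types : List String), Dom_minimum_runways arrivals departures types → Pre_minimum_runways arrivals departures types → Spec_minimum_runways arrivals departures types (minimum_runways arrivals departures types)

-- ===== LEMMAS AND PROOFS =====

-- a common structural form for both partition loops: recurse on types, consuming the fronts
def pvTFold {σ : Type} (f : σ → Int → Int → String → σ) : List Int → List Int → List String → σ → σ
  | _, _, [], init => init
  | ar, dp, t :: tp, init => pvTFold f ar.tail dp.tail tp (f init (ar.getD 0 0) (dp.getD 0 0) t)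

-- the merge of the two sorted commercial lists into one sorted event list (departures first on ties)
def pvMergeEv : List Int → List Int → List Int
  | [], ds => ds.map (fun d => 3 * d - 1)
  | a :: as, [] => (a :: as).map (fun a => 3 * a + 1)
  | a :: as, d :: ds =>
    if a < d then (3 * a + 1) :: pvMergeEv as (d :: ds)
    else (3 * d - 1) :: pvMergeEv (a :: as) ds
termination_by as ds => as.length + ds.length

-- A's indexed for-loop over range(len(types)) is pvTFold
lemma pvL1 {σ : Type} (f : σ → Int → Int → String → σ) (TP : List String) (ar dp : List Int) :
    ∀ (n s : Nat), TP.length - s = n → ∀ (init : σ),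
      (PySem.List.pyRange (s : Int) (TP.length : Int) 1).foldl
        (fun st i => f st (PySem.List.pyGetD ar i 0) (PySem.List.pyGetD dp i 0)
            (PySem.List.pyGetD TP i "")) init
      = pvTFold f (ar.drop s) (dp.drop s) (TP.drop s) init := by
  intro n
  induction n with
  | zero =>
    intro s hs init
    rw [PySem.List.pyRange_one_eq_nil (by omega)]
    rw [show TP.drop s = [] from List.drop_eq_nil_of_le (by omega)]
    simp [pvTFold]
  | succ n ih =>
    intro s hs init
    have hlt : s < TP.length := by omega
    rw [PySem.List.pyRange_one_cons (by exact_mod_cast hlt)]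
    have hdrop : TP.drop s = TP.getD s "" :: TP.drop (s + 1) := by
      rw [List.drop_eq_getElem_cons hlt]
      simp [List.getD, List.getElem?_eq_getElem hlt]
    rw [hdrop]
    simp only [List.foldl_cons, pvTFold]
    have hcast : ((s : Int) + 1) = ((s + 1 : Nat) : Int) := by push_cast; ring
    rw [hcast, ih (s + 1) (by omega)]
    congr 1 <;> simp [List.tail_drop, List.getD, List.getElem?_drop]
  
-- B's enumerate loop is pvTFold
lemma pvL2 {σ : Type} (g : σ → Int → Int → String → σ) :
    ∀ (tp : List String) (s : Nat) (ar dp : List Int) (init : σ),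
      (PySem.List.enumerate tp (s : Int)).foldl
        (fun st it => g st (PySem.List.pyGetD ar it.1 0) (PySem.List.pyGetD dp it.1 0) it.2) init
      = pvTFold g (ar.drop s) (dp.drop s) tp init := by
  intro tp
  induction tp with
  | nil => intro s ar dp init; simp [PySem.List.enumerate_nil, pvTFold]
  | cons t tp ih =>
    intro s ar dp init
    rw [PySem.List.enumerate_cons]
    simp only [List.foldl_cons, pvTFold]
    have hcast : ((s : Int) + 1) = ((s + 1 : Nat) : Int) := by push_cast; ring
    rw [hcast, ih (s + 1)]
    congr 1 <;> simp [List.tail_drop, List.getD, List.getElem?_drop]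

-- joint invariant of the two partition loops
lemma pvPart : ∀ (tp : List String) (ar dp : List Int) (ca cd ev : List Int) (ex : Int),
    ca.length = cd.length →
    ev.Perm (ca.map (fun x => 3 * x + 1) ++ cd.map (fun x => 3 * x - 1)) →
    (pvTFold pvBodyA ar dp tp (ca, cd, ex)).1.length = (pvTFold pvBodyA ar dp tp (ca, cd, ex)).2.1.length ∧
    (pvTFold pvBodyB ar dp tp (ev, ex)).2 = (pvTFold pvBodyA ar dp tp (ca, cd, ex)).2.2 ∧
    (pvTFold pvBodyB ar dp tp (ev, ex)).1.Perm
      ((pvTFold pvBodyA ar dp tp (ca, cd, ex)).1.map (fun x => 3 * x + 1) ++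
       (pvTFold pvBodyA ar dp tp (ca, cd, ex)).2.1.map (fun x => 3 * x - 1)) := by
  intro tp
  induction tp with
  | nil => intro ar dp ca cd ev ex hlen hperm; exact ⟨hlen, rfl, hperm⟩
  | cons t tp ih =>
    intro ar dp ca cd ev ex hlen hperm
    simp only [pvTFold, pvBodyA, pvBodyB]
    by_cases h : (PySem.Str.lower t == "private" || PySem.Str.lower t == "military") = true
    · simp only [h]
      exact ih _ _ ca cd ev (ex + 1) hlen hperm
    · simp only [h]
      simp only [Bool.not_eq_true] at h
      rw [if_neg (by simp), if_neg (by simp)]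
      apply ih
      · simp [hlen]
      · rw [List.perm_iff_count]
        intro e
        have := List.Perm.count_eq hperm e
        simp only [List.count_append] at *
        simp [List.count_cons, this]
        omega

lemma pvMergeEv_perm : ∀ (as ds : List Int),
    (pvMergeEv as ds).Perm (as.map (fun x => 3 * x + 1) ++ ds.map (fun x => 3 * x - 1)) := by
  intro as ds
  induction as, ds using pvMergeEv.induct with
  | case1 ds => simp [pvMergeEv]
  | case2 a as => simp [pvMergeEv]
  | case3 a as d ds h ih =>
    rw [pvMergeEv, if_pos h]
    simpa using ih.cons (3 * a + 1)
  | case4 a as d ds h ih =>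
    rw [pvMergeEv, if_neg h]
    refine (ih.cons (3 * d - 1)).trans ?_
    simp only [List.map_cons, List.cons_append]
    exact (List.Perm.swap _ _ _).trans (List.perm_middle.symm.cons _)

lemma pvMergeEv_pairwise : ∀ (as ds : List Int),
    as.Pairwise (· ≤ ·) → ds.Pairwise (· ≤ ·) → (pvMergeEv as ds).Pairwise (· ≤ ·) := by
  intro as ds
  induction as, ds using pvMergeEv.induct with
  | case1 ds =>
    intro _ hd
    rw [pvMergeEv]
    exact List.pairwise_map.mpr (hd.imp (fun hab => by omega))
  | case2 a as =>
    intro ha _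
    rw [pvMergeEv]
    exact List.pairwise_map.mpr (ha.imp (fun hab => by omega))
  | case3 a as d ds h ih =>
    intro ha hd
    rw [pvMergeEv, if_pos h]
    rw [List.pairwise_cons]
    obtain ⟨hahead, ha'⟩ := List.pairwise_cons.mp ha
    refine ⟨?_, ih ha' hd⟩
    intro y hy
    have hy' := ((pvMergeEv_perm as (d :: ds)).mem_iff).mp hy
    rw [List.mem_append] at hy'
    rcases hy' with hy' | hy'
    · obtain ⟨a', ha'mem, rfl⟩ := List.mem_map.mp hy'
      have := hahead a' ha'mem; omega
    · obtain ⟨d', hd'mem, rfl⟩ := List.mem_map.mp hy'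
      have : d ≤ d' := by
        rcases List.mem_cons.mp hd'mem with rfl | hmem
        · omega
        · exact (List.pairwise_cons.mp hd).1 d' hmem
      omega
  | case4 a as d ds h ih =>
    intro ha hd
    rw [pvMergeEv, if_neg h]
    rw [List.pairwise_cons]
    obtain ⟨hdhead, hd'⟩ := List.pairwise_cons.mp hd
    refine ⟨?_, ih ha hd'⟩
    intro y hy
    have hy' := ((pvMergeEv_perm (a :: as) ds).mem_iff).mp hy
    rw [List.mem_append] at hy'
    have hda : d ≤ a := by omega
    rcases hy' with hy' | hy'
    · obtain ⟨a', ha'mem, rfl⟩ := List.mem_map.mp hy'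
      have : a ≤ a' := by
        rcases List.mem_cons.mp ha'mem with rfl | hmem
        · omega
        · exact (List.pairwise_cons.mp ha).1 a' hmem
      omega
    · obtain ⟨d', hd'mem, rfl⟩ := List.mem_map.mp hy'
      have := hdhead d' hd'mem; omega

lemma pvStep_arr (p : Int × Int) (a : Int) : pvStep p (3 * a + 1) = (p.1 + 1, max p.2 (p.1 + 1)) := by
  simp [pvStep]

lemma pvStep_dep (p : Int × Int) (d : Int) : pvStep p (3 * d - 1) = (p.1 - 1, max p.2 (p.1 - 1)) := by
  simp [pvStep]
  constructor <;> omega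

lemma pvSweepDep : ∀ (ds : List Int) (cur mx : Int), cur ≤ mx →
    ((ds.map (fun d => 3 * d - 1)).foldl pvStep (cur, mx)).2 = mx := by
  intro ds
  induction ds with
  | nil => intro cur mx h; simp
  | cons d ds ih =>
    intro cur mx h
    simp only [List.map_cons, List.foldl_cons, pvStep_dep]
    rw [show max mx (cur - 1) = mx by omega]
    exact ih (cur - 1) mx (by omega)

lemma pvSweepArrNeg : ∀ (as : List Int) (cur mx : Int), 0 ≤ mx → cur + as.length ≤ 0 →
    ((as.map (fun a => 3 * a + 1)).foldl pvStep (cur, mx)).2 = mx := by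
  intro as
  induction as with
  | nil => intro cur mx h1 h2; simp
  | cons a as ih =>
    intro cur mx h1 h2
    simp only [List.length_cons] at h2
    simp only [List.map_cons, List.foldl_cons, pvStep_arr]
    rw [show max mx (cur + 1) = mx by push_cast at h2 ⊢; omega]
    exact ih (cur + 1) mx h1 (by push_cast at h2 ⊢; omega)

lemma pvSweep : ∀ (as ds : List Int) (cur mx : Int), 0 ≤ mx → cur ≤ mx →
    cur = (ds.length : Int) - (as.length : Int) →
    ((pvMergeEv as ds).foldl pvStep (cur, mx)).2 = pvLoopA as ds cur mx := by
  intro as ds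
  induction as, ds using pvMergeEv.induct with
  | case1 ds =>
    intro cur mx h1 h2 h3
    rw [pvMergeEv, pvLoopA]
    exact pvSweepDep ds cur mx h2
  | case2 a as =>
    intro cur mx h1 h2 h3
    rw [pvMergeEv, pvLoopA]
    apply pvSweepArrNeg _ _ _ h1
    simp only [List.length_cons, List.length_nil] at h3 ⊢
    push_cast at h3 ⊢
    omega
  | case3 a as d ds h ih =>
    intro cur mx h1 h2 h3
    rw [pvMergeEv, if_pos h, pvLoopA, if_pos h]
    simp only [List.foldl_cons, pvStep_arr]
    exact ih _ _ (by omega) (by omega)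
      (by simp only [List.length_cons] at h3 ⊢; push_cast at h3 ⊢; omega)
  | case4 a as d ds h ih =>
    intro cur mx h1 h2 h3
    rw [pvMergeEv, if_neg h, pvLoopA, if_neg h]
    simp only [List.foldl_cons, pvStep_dep]
    rw [show max mx (cur - 1) = mx by omega]
    exact ih _ _ h1 (by omega)
      (by simp only [List.length_cons] at h3 ⊢; push_cast at h3 ⊢; omega)

-- ===== VERDICT (by name: the statement is the Claim_ definition above) =====
theorem minimum_runways_spec : Claim_equal_minimum_runways := by
  intro arrivals departures types _ _
  unfold Spec_minimum_runways minimum_runways minimum_runways_alt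
  dsimp only
  have hA := pvL1 pvBodyA types arrivals departures types.length 0 (by omega) ([], [], 0)
  have hB := pvL2 pvBodyB types 0 arrivals departures ([], 0)
  simp only [Nat.cast_zero, List.drop_zero] at hA hB
  rw [hA, hB]
  set stA := pvTFold pvBodyA arrivals departures types ([], [], 0) with hstA
  set stB := pvTFold pvBodyB arrivals departures types ([], 0) with hstB
  obtain ⟨hlen, hex, hperm⟩ :=
    pvPart types arrivals departures [] [] [] 0 rfl (by simp)
  rw [← hstA] at hlen hex hperm
  rw [← hstB] at hex hperm
  set sca := PySem.List.sorted stA.1 (fun x => x) false with hsca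
  set scd := PySem.List.sorted stA.2.1 (fun x => x) false with hscd
  have hsorted : PySem.List.sorted stB.1 (fun x => x) false = pvMergeEv sca scd := by
    apply PySem.List.sorted_id_eq_of_perm_of_pairwise
    · refine (pvMergeEv_perm sca scd).trans ?_
      refine (((PySem.List.sorted_perm _ _ _).map _).append ((PySem.List.sorted_perm _ _ _).map _)).trans ?_
      exact hperm.symm
    · apply pvMergeEv_pairwise
      · have := PySem.List.sorted_pairwise stA.1 (fun x => x)
        simpa using this
      · have := PySem.List.sorted_pairwise stA.2.1 (fun x => x)
        simpa using this
  rw [hsorted, hex]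
  have hlens : (scd.length : Int) - (sca.length : Int) = 0 := by
    rw [hsca, hscd, PySem.List.length_sorted, PySem.List.length_sorted, hlen]; ring
  rw [pvSweep sca scd 0 0 le_rfl le_rfl (by omega)]
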